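-- pv_equiv track=rewrite | github.com/blossom22/11_Inflearn_Algorithm | 6_greedy_2.py | solution
-- ===== SOURCE A (Python) =====
-- def solution(box, limit):
--     boxcnt = 0
--     applecnt = 0
--     box.sort(key=lambda v:(-v[1]))
--     for i in box:
--         for j in range(i[0]):
--             boxcnt += 1
--             applecnt += i[1]
--             if boxcnt==limit:
--                 return applecnt
-- ===== SOURCE B (Python) =====
-- def solution(box, limit):
--     box.sort(key=lambda v: -v[1])
--     total = 0
--     remaining = limit
--     for cnt, val in box:
--         take = min(cnt, remaining)
--         if take > 0:
--             total += take * val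
--             remaining -= take
--             if remaining == 0:
--                 return total
--     return None
-- ===== Notes on version B (the rewrite author's own statement) =====
-- stated objective: faster
-- what changed: Replaces the per-apple unit inner loop with per-box arithmetic: take min(count, remaining) apples from each box at once, so the cost after sorting is O(N) instead of O(limit).
import Mathlib
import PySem

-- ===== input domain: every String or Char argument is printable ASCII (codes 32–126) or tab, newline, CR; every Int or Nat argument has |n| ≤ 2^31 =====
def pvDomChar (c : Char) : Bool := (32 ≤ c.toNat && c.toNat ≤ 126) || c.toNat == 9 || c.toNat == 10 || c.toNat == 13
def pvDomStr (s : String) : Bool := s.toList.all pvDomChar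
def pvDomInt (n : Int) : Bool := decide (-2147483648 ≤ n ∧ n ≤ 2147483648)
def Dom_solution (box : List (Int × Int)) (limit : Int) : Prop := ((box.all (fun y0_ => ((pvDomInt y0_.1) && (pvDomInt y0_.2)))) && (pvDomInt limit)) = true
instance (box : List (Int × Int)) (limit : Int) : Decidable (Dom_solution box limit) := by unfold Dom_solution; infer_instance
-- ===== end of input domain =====

-- B replaces A's per-apple unit inner loop with per-box arithmetic (grab min(count, remaining)
-- apples from a box at once), for O(n log n) instead of O(n log n + limit). Both Pythons sort
-- `box` in place (same side effect); the theorems below are about the return value.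

-- ===== PORT A =====
-- inner loop `for j in range(i[0])`: returns .inr applecnt on early return, else the updated state
def pvInnerA (n : Nat) (v limit boxcnt applecnt : Int) : (Int × Int) ⊕ Int :=
  match n with
  | 0 => Sum.inl (boxcnt, applecnt)
  | n + 1 =>
    let boxcnt := boxcnt + 1
    let applecnt := applecnt + v
    if boxcnt = limit then Sum.inr applecnt else pvInnerA n v limit boxcnt applecnt

def pvOuterA (l : List (Int × Int)) (limit boxcnt applecnt : Int) : Option Int :=
  match l with
  | [] => none
  | (c, v) :: rest =>
    match pvInnerA c.toNat v limit boxcnt applecnt with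
    | Sum.inr r => some r
    | Sum.inl (b, a) => pvOuterA rest limit b a

def solution (box : List (Int × Int)) (limit : Int) : Option Int :=
  pvOuterA (PySem.List.sorted box (fun v => -v.2) false) limit 0 0

-- ===== PORT B =====
def pvLoopB (l : List (Int × Int)) (remaining total : Int) : Option Int :=
  match l with
  | [] => none
  | (cnt, val) :: rest =>
    let take := min cnt remaining
    if 0 < take then
      let total := total + take * val
      let remaining := remaining - take
      if remaining = 0 then some total else pvLoopB rest remaining total
    else pvLoopB rest remaining total

def solution_alt (box : List (Int × Int)) (limit : Int) : Option Int :=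
  pvLoopB (PySem.List.sorted box (fun v => -v.2) false) limit 0

-- ===== PRECONDITION & SPEC =====
def Spec_solution (box : List (Int × Int)) (limit : Int) (out : Option Int) : Prop := out = solution_alt box limit
instance (box : List (Int × Int)) (limit : Int) (out : Option Int) : Decidable (Spec_solution box limit out) := by unfold Spec_solution; infer_instance

-- ===== CLAIM (what is proved, stated in full; the proofs are below) =====
def Claim_equal_solution : Prop := ∀ (box : List (Int × Int)) (limit : Int), Dom_solution box limit → Spec_solution box limit (solution box limit)

-- ===== LEMMAS AND PROOFS =====
theorem pvInnerA_eq (n : Nat) (v limit : Int) :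
    ∀ boxcnt applecnt : Int,
      pvInnerA n v limit boxcnt applecnt =
        if 0 < limit - boxcnt ∧ limit - boxcnt ≤ (n : Int) then
          Sum.inr (applecnt + (limit - boxcnt) * v)
        else Sum.inl (boxcnt + n, applecnt + n * v) := by
  induction n with
  | zero =>
    intro boxcnt applecnt
    simp [pvInnerA]
  | succ n ih =>
    intro boxcnt applecnt
    simp only [pvInnerA]
    by_cases h : boxcnt + 1 = limit
    · have : limit - boxcnt = 1 := by omega
      simp [h, this]
    · rw [if_neg h, ih]
      by_cases h2 : 0 < limit - (boxcnt + 1) ∧ limit - (boxcnt + 1) ≤ (n : Int)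
      · rw [if_pos h2, if_pos (by push_cast; omega)]
        congr 1; ring
      · rw [if_neg h2, if_neg (by push_cast; omega)]
        simp only [Sum.inl.injEq, Prod.mk.injEq]
        constructor <;> push_cast <;> ring

-- when nothing remains to take, both loops run to the end and return none
theorem pvOuterA_none (l : List (Int × Int)) :
    ∀ limit boxcnt applecnt : Int, limit - boxcnt ≤ 0 →
      pvOuterA l limit boxcnt applecnt = none := by
  induction l with
  | nil => intro _ _ _ _; simp [pvOuterA]
  | cons hd tl ih =>
    intro limit boxcnt applecnt h
    obtain ⟨c, v⟩ := hd
    simp only [pvOuterA, pvInnerA_eq]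
    rw [if_neg (by omega)]
    exact ih limit (boxcnt + c.toNat) _ (by omega)

theorem pvLoopB_none (l : List (Int × Int)) :
    ∀ remaining total : Int, remaining ≤ 0 →
      pvLoopB l remaining total = none := by
  induction l with
  | nil => intro _ _ _; simp [pvLoopB]
  | cons hd tl ih =>
    intro remaining total h
    obtain ⟨c, v⟩ := hd
    simp only [pvLoopB]
    rw [if_neg (by omega)]
    exact ih remaining total h

theorem pvOuterA_eq (l : List (Int × Int)) :
    ∀ limit boxcnt applecnt : Int,
      pvOuterA l limit boxcnt applecnt = pvLoopB l (limit - boxcnt) applecnt := by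
  induction l with
  | nil => intro limit boxcnt applecnt; simp [pvOuterA, pvLoopB]
  | cons hd tl ih =>
    intro limit boxcnt applecnt
    obtain ⟨c, v⟩ := hd
    by_cases hr : limit - boxcnt ≤ 0
    · rw [pvOuterA_none _ _ _ _ hr, pvLoopB_none _ _ _ hr]
    · simp only [pvOuterA, pvLoopB, pvInnerA_eq]
      by_cases ht : 0 < min c (limit - boxcnt)
      · rw [if_pos ht]
        by_cases hd : limit - boxcnt ≤ c
        · have hm : min c (limit - boxcnt) = limit - boxcnt := by omega
          rw [if_pos (by omega), hm, if_pos (by ring)]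
        · have hm : min c (limit - boxcnt) = c := by omega
          have hc : ((c.toNat : Int)) = c := by omega
          rw [if_neg (by omega), hm, if_neg (by omega)]
          simp only []
          rw [ih, hc]
          congr 1
          omega
      · rw [if_neg ht, if_neg (by omega)]
        simp only []
        rw [ih]
        have hc : ((c.toNat : Int)) = 0 := by omega
        rw [hc]
        congr 1 <;> omega

-- ===== VERDICT (by name: the statement is the Claim_ definition above) =====
theorem solution_spec : Claim_equal_solution := by
  intro box limit _
  show solution box limit = solution_alt box limit
  simp [solution, solution_alt, pvOuterA_eq]
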